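-- pv_equiv track=rewrite | github.com/sorrowless/ansible_controller | tools/ci-script.py | match_role_name_src
-- ===== SOURCE A (Python) =====
-- def match_role_name_src(roles_lists: dict, roles: list) -> set:
--     '''Returns roles set which needed to be downloaded and apply
--
--        Gets all given roles lists which usually contain all the roles sources
--        paths. Then gets all given roles which are actually the list of roles
--        names to be applied. Then iterates over roles lists and for each source
--        in given role list check if this source name/src matches to role names
--        in roles.
--
--        args:
--            roles_lists: dict with roles lists. Looks like:
--                [
--                 "tools/roles_lists/ldap.yml":
--                   [
--                     {
--                      src: https://github.com/MikeCher/ansible-role-openldap.git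
--                      version: master
--                      name: mikecher.ansible-role-openldap
--                     }
--                   ]
--                ]
--
--            roles: list with roles to apply. Looks like:
--                [
--                 mikecher.ansible-role-openldap
--                ]
--
--         returns: set of roles to apply
--     '''
--     modified_roles = set()
--
--     for role in roles:
--         for role_list in roles_lists:
--             for role_src in roles_lists[role_list]:
--                 if role == role_src.get("name", None) or role == role_src.get("src", None):
--                     modified_roles.add(role_list)
--
--     return modified_roles
-- ===== SOURCE B (Python) =====
-- def match_role_name_src(roles_lists: dict, roles: list) -> set:
--     """Single-pass index from each source's name/src value to the role-list
--     files containing it, then one lookup per requested role (O(R+S) instead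
--     of A's O(R*S) nested scan)."""
--     index = {}
--     for role_list, srcs in roles_lists.items():
--         for role_src in srcs:
--             for key in ("name", "src"):
--                 v = role_src.get(key)
--                 if v is not None:
--                     bucket = index.setdefault(v, [])
--                     if role_list not in bucket:
--                         bucket.append(role_list)
--     modified_roles = set()
--     for role in roles:
--         for role_list in index.get(role, ()):
--             modified_roles.add(role_list)
--     return modified_roles
-- ===== Notes on version B (the rewrite author's own statement) =====
-- stated objective: faster
-- what changed: Instead of A's nested scan of every role against every source entry of every role list, B builds a name/src -> role-list index in one pass over the role lists and answers each requested role with a single dictionary lookup.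
import Mathlib
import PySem

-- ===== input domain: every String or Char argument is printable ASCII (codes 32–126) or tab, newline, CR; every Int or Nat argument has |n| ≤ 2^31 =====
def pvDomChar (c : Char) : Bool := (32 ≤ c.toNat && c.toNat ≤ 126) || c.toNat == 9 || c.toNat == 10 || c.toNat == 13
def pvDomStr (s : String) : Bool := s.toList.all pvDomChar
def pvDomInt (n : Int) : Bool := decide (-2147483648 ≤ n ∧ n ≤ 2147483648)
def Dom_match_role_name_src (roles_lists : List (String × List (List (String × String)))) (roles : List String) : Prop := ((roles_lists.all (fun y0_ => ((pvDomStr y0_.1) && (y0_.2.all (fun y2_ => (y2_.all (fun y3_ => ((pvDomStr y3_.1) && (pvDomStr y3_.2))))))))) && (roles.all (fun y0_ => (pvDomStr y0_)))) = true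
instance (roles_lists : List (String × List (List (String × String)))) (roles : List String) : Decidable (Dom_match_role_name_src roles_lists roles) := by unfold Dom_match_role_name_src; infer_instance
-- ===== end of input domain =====

-- B replaces A's nested roles×role_lists scan by a one-pass name/src → role-list index with one lookup per role (faster: asymptotic).


-- ===== PORT A =====
-- 'for role_list in roles_lists: … roles_lists[role_list]' on a Python dict visits each (key, value) pair
-- in insertion order, i.e. the items of PySem.Dict.ofList roles_lists.
def match_role_name_src (roles_lists : List (String × List (List (String × String)))) (roles : List String) : List String :=
  let d := PySem.Dict.ofList roles_lists
  roles.foldl (fun modified_roles role =>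
    d.items.foldl (fun modified_roles p =>
      p.2.foldl (fun modified_roles role_src =>
        if ((PySem.Dict.ofList role_src).get? "name" == some role) ||
           ((PySem.Dict.ofList role_src).get? "src" == some role)
        then PySem.Set.add modified_roles p.1 else modified_roles) modified_roles)
      modified_roles) PySem.Set.empty

-- ===== PORT B =====
-- 'bucket = index.setdefault(v, []); if role_list not in bucket: bucket.append(role_list)' is
-- PySem.Dict.insert of PySem.Set.add on the current bucket.
def match_role_name_src_alt (roles_lists : List (String × List (List (String × String)))) (roles : List String) : List String :=
  let d := PySem.Dict.ofList roles_lists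
  let index : PySem.Dict String (List String) :=
    d.items.foldl (fun idx p =>
      p.2.foldl (fun idx role_src =>
        (["name", "src"] : List String).foldl (fun idx key =>
          match (PySem.Dict.ofList role_src).get? key with
          | some v => idx.insert v (PySem.Set.add (idx.getD v []) p.1)
          | none => idx) idx) idx) PySem.Dict.empty
  roles.foldl (fun modified_roles role =>
    PySem.Set.update modified_roles (index.getD role [])) PySem.Set.empty

-- ===== PRECONDITION & SPEC =====
def Spec_match_role_name_src (roles_lists : List (String × List (List (String × String)))) (roles : List String) (out : List String) : Prop := out = match_role_name_src_alt roles_lists roles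
instance (roles_lists : List (String × List (List (String × String)))) (roles : List String) (out : List String) : Decidable (Spec_match_role_name_src roles_lists roles out) := by unfold Spec_match_role_name_src; infer_instance

-- ===== CLAIM (what is proved, stated in full; the proofs are below) =====
def Claim_equal_match_role_name_src : Prop := ∀ (roles_lists : List (String × List (List (String × String)))) (roles : List String), Dom_match_role_name_src roles_lists roles → Spec_match_role_name_src roles_lists roles (match_role_name_src roles_lists roles)

-- ===== LEMMAS AND PROOFS =====

-- the match test A applies to one source entry
def pvMatch (role : String) (rs : List (String × String)) : Bool :=
  ((PySem.Dict.ofList rs).get? "name" == some role) || ((PySem.Dict.ofList rs).get? "src" == some role)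

-- B's per-source index update step
def pvEntryStep (rl : String) (idx : PySem.Dict String (List String)) (rs : List (String × String)) : PySem.Dict String (List String) :=
  (["name", "src"] : List String).foldl (fun idx key =>
    match (PySem.Dict.ofList rs).get? key with
    | some v => idx.insert v (PySem.Set.add (idx.getD v []) rl)
    | none => idx) idx

theorem pv_add_of_mem {s : PySem.Set String} {x : String} (h : x ∈ s) : PySem.Set.add s x = s := by
  simp [PySem.Set.add, PySem.Set.contains, h]

theorem pv_mem_foldl_add (t : List String) (s : PySem.Set String) (x : String) (h : x ∈ s) :
    x ∈ t.foldl PySem.Set.add s := by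
  induction t generalizing s with
  | nil => exact h
  | cons y t ih => exact ih _ ((PySem.Set.mem_add _ _ _).2 (Or.inl h))

theorem pv_mem_foldl_add' : ∀ (t : List String) (s : PySem.Set String) (x : String), x ∈ t → x ∈ t.foldl PySem.Set.add s
  | [], _, _, h => nomatch h
  | y :: t, s, x, h => by
      rcases List.mem_cons.1 h with h' | h'
      · exact pv_mem_foldl_add t _ x ((PySem.Set.mem_add _ _ _).2 (Or.inr h'))
      · exact pv_mem_foldl_add' t _ x h'

theorem pv_foldl_add_add (s t : PySem.Set String) (y : String) :
    List.foldl PySem.Set.add s (PySem.Set.add t y) = PySem.Set.add (List.foldl PySem.Set.add s t) y := by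
  by_cases h : y ∈ t
  · rw [pv_add_of_mem h, pv_add_of_mem (pv_mem_foldl_add' t s y h)]
  · have he : PySem.Set.add t y = t ++ [y] := by simp [PySem.Set.add, PySem.Set.contains, h]
    rw [he, List.foldl_append]
    rfl

theorem pv_foldl_add_foldl_add (ys : List String) (t s : PySem.Set String) :
    List.foldl PySem.Set.add s (List.foldl PySem.Set.add t ys)
      = List.foldl PySem.Set.add (List.foldl PySem.Set.add s t) ys := by
  induction ys generalizing t s with
  | nil => rfl
  | cons y ys ih =>
      simp only [List.foldl_cons]
      rw [ih, pv_foldl_add_add]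

-- collapse A's innermost fold over one role list's sources
theorem pv_innerA (role rl : String) (srcs : List (List (String × String))) (s : PySem.Set String) :
    srcs.foldl (fun s rs => if pvMatch role rs then PySem.Set.add s rl else s) s
      = if srcs.any (pvMatch role) then PySem.Set.add s rl else s := by
  induction srcs generalizing s with
  | nil => simp
  | cons rs srcs ih =>
      simp only [List.foldl_cons, List.any_cons]
      by_cases h : pvMatch role rs
      · simp [h, ih]
      · simp [h, ih]

-- running A's conditional-add trace from s = updating s with the trace run from ∅
theorem pv_condFold (role : String) (L : List (String × List (List (String × String)))) (s : PySem.Set String) :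
    L.foldl (fun s p => if p.2.any (pvMatch role) then PySem.Set.add s p.1 else s) s
      = PySem.Set.update s (L.foldl (fun acc p => if p.2.any (pvMatch role) then PySem.Set.add acc p.1 else acc) PySem.Set.empty) := by
  induction L generalizing s with
  | nil => rfl
  | cons p L ih =>
      simp only [List.foldl_cons]
      by_cases h : p.2.any (pvMatch role)
      · simp only [h, if_pos]
        rw [ih (PySem.Set.add s p.1), ih (PySem.Set.add PySem.Set.empty p.1)]
        simp only [PySem.Set.update]
        rw [pv_foldl_add_foldl_add, pv_foldl_add_add]
        rfl
      · rw [if_neg h, if_neg h]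
        exact ih s

theorem pv_entry_getD (rl role : String) (idx : PySem.Dict String (List String)) (rs : List (String × String)) :
    (pvEntryStep rl idx rs).getD role []
      = if pvMatch role rs then PySem.Set.add (idx.getD role []) rl else idx.getD role [] := by
  unfold pvEntryStep pvMatch
  simp only [List.foldl_cons, List.foldl_nil]
  cases hn : (PySem.Dict.ofList rs).get? "name" <;> cases hs : (PySem.Dict.ofList rs).get? "src" <;>
    simp only [PySem.Dict.getD_insert]
  · simp
  · rename_i w
    by_cases hw : role = w
    · subst hw
      simp
    · simp [hw, Ne.symm hw]
  · rename_i v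
    by_cases hv : role = v
    · subst hv
      simp
    · simp [hv, Ne.symm hv]
  · rename_i v w
    by_cases hv : role = v <;> by_cases hw : role = w
    · subst hv
      subst hw
      simp
    · subst hv
      simp [hw]
    · subst hw
      simp [hv]
    · simp [hv, hw, Ne.symm hv, Ne.symm hw]

theorem pv_srcs_getD (rl role : String) (srcs : List (List (String × String))) (idx : PySem.Dict String (List String)) :
    ((srcs.foldl (pvEntryStep rl) idx).getD role [])
      = if srcs.any (pvMatch role) then PySem.Set.add (idx.getD role []) rl else idx.getD role [] := by
  induction srcs generalizing idx with
  | nil => simp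
  | cons rs srcs ih =>
      simp only [List.foldl_cons, List.any_cons]
      rw [ih, pv_entry_getD]
      by_cases h : pvMatch role rs
      · simp [h]
      · simp [h]

theorem pv_build_getD (role : String) (L : List (String × List (List (String × String)))) (idx : PySem.Dict String (List String)) :
    (L.foldl (fun idx p => p.2.foldl (pvEntryStep p.1) idx) idx).getD role []
      = L.foldl (fun acc p => if p.2.any (pvMatch role) then PySem.Set.add acc p.1 else acc) (idx.getD role []) := by
  induction L generalizing idx with
  | nil => rfl
  | cons p L ih =>
      simp only [List.foldl_cons]
      rw [ih, pv_srcs_getD]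

-- ===== VERDICT (by name: the statement is the Claim_ definition above) =====
theorem match_role_name_src_spec : Claim_equal_match_role_name_src := by
  intro roles_lists roles _
  unfold Spec_match_role_name_src match_role_name_src match_role_name_src_alt
  have hfg : (fun (ms : PySem.Set String) (role : String) =>
        (PySem.Dict.ofList roles_lists).items.foldl
          (fun ms p => p.2.foldl (fun ms rs => if pvMatch role rs then PySem.Set.add ms p.1 else ms) ms) ms)
      = (fun (ms : PySem.Set String) (role : String) => PySem.Set.update ms
          (((PySem.Dict.ofList roles_lists).items.foldl
            (fun idx p => p.2.foldl (pvEntryStep p.1) idx) PySem.Dict.empty).getD role [])) := by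
    funext ms role
    have h1 : (fun (ms : PySem.Set String) (p : String × List (List (String × String))) =>
          p.2.foldl (fun ms rs => if pvMatch role rs then PySem.Set.add ms p.1 else ms) ms)
        = (fun ms p => if p.2.any (pvMatch role) then PySem.Set.add ms p.1 else ms) := by
      funext ms p
      exact pv_innerA role p.1 p.2 ms
    rw [h1, pv_condFold, pv_build_getD]
    rfl
  show roles.foldl (fun (ms : PySem.Set String) (role : String) =>
        (PySem.Dict.ofList roles_lists).items.foldl
          (fun ms p => p.2.foldl (fun ms rs => if pvMatch role rs then PySem.Set.add ms p.1 else ms) ms) ms)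
        PySem.Set.empty
      = roles.foldl (fun (ms : PySem.Set String) (role : String) => PySem.Set.update ms
          (((PySem.Dict.ofList roles_lists).items.foldl
            (fun idx p => p.2.foldl (pvEntryStep p.1) idx) PySem.Dict.empty).getD role []))
        PySem.Set.empty
  rw [hfg]
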